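-- pv_equiv track=rewrite | github.com/Nivethashan/Advent-of-code | 2023/Day3/main.py | get_full_number
-- ===== SOURCE A (Python) =====
-- def get_full_number(arr, row, col):
--     str_num = arr[row][col]
--     skip = 0
--     for i in range(col + 1,len(arr[row])):
--         if arr[row][i].isdigit():
--             str_num = str_num + arr[row][i]
--             skip = skip + 1
--         else:
--             break
--     for i in range(col - 1, -1, -1):
--         if arr[row][i].isdigit():
--             str_num = arr[row][i] + str_num
--         else:
--             break
--     return str_num, skip
-- ===== SOURCE B (Python) =====
-- def get_full_number(arr, row, col):
--     line = arr[row]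
--     r = col
--     while r + 1 < len(line) and line[r + 1].isdigit():
--         r += 1
--     l = col
--     while l > 0 and line[l - 1].isdigit():
--         l -= 1
--     return ''.join(line[l:r + 1]), r - col
-- ===== Notes on version B (the rewrite author's own statement) =====
-- stated objective: simpler
-- what changed: B locates the endpoints l and r of the digit run around col with two index scans and then builds the result in one shot with ''.join(line[l:r+1]) and skip = r - col, instead of A's per-character string accumulation (append/prepend) inside the scanning loops.
-- outside the precondition, e.g. on get_full_number([['1', '2']], 0, -1): A returns ('212', 2), B returns ('2', 2)
import Mathlib
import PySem

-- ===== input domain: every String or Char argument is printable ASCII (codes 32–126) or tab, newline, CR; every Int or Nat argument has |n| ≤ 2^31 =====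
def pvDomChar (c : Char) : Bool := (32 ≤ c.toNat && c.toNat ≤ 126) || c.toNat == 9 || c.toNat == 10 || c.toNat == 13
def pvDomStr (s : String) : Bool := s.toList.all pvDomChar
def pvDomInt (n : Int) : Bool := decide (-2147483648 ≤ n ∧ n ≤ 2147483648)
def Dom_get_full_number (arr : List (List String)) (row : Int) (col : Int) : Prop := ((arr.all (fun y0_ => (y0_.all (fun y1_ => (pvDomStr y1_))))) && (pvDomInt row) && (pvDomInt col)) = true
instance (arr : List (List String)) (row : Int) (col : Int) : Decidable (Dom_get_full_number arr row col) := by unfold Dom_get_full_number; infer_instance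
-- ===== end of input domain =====

-- B replaces A's per-character string accumulation with locating the run's end
-- indices and one slice/join (objective: simpler). Python strings are handled on
-- the char-list side (String.toList / String.ofList) per the PySem convention.

-- ===== PORT A =====
-- for i in range(col+1, len(arr[row])): append digits, break at first non-digit
def loopA_R (line : List String) : List Int → List Char → Int → List Char × Int
  | [], s, k => (s, k)
  | i :: is, s, k =>
    let c := (PySem.List.pyGet? line i).getD ""
    if PySem.Str.strIsdigit c then loopA_R line is (s ++ c.toList) (k + 1) else (s, k)

-- for i in range(col-1, -1, -1): prepend digits, break at first non-digit
def loopA_L (line : List String) : List Int → List Char → List Char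
  | [], s => s
  | i :: is, s =>
    let c := (PySem.List.pyGet? line i).getD ""
    if PySem.Str.strIsdigit c then loopA_L line is (c.toList ++ s) else s

def get_full_number (arr : List (List String)) (row : Int) (col : Int) : String × Int :=
  let line := (PySem.List.pyGet? arr row).getD []
  let s0 := ((PySem.List.pyGet? line col).getD "").toList
  let res := loopA_R line (PySem.List.pyRange (col + 1) (line.length : Int)) s0 0
  let s2 := loopA_L line (PySem.List.pyRange (col - 1) (-1) (-1)) res.1
  (String.ofList s2, res.2)

-- ===== PORT B =====
-- while r + 1 < len(line) and line[r+1].isdigit(): r += 1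
def scanR (line : List String) (r : Int) : Int :=
  if h : r + 1 < (line.length : Int) ∧ PySem.Str.strIsdigit ((PySem.List.pyGet? line (r + 1)).getD "") = true
  then scanR line (r + 1) else r
termination_by ((line.length : Int) - r).toNat
decreasing_by omega

-- while l > 0 and line[l-1].isdigit(): l -= 1
def scanL (line : List String) (l : Int) : Int :=
  if h : 0 < l ∧ PySem.Str.strIsdigit ((PySem.List.pyGet? line (l - 1)).getD "") = true
  then scanL line (l - 1) else l
termination_by l.toNat
decreasing_by omega

def get_full_number_alt (arr : List (List String)) (row : Int) (col : Int) : String × Int :=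
  let line := (PySem.List.pyGet? arr row).getD []
  let r := scanR line col
  let l := scanL line col
  (PySem.Str.join "" (PySem.List.slice line (some l) (some (r + 1))), r - col)

-- ===== PRECONDITION & SPEC =====
-- Pre_ excludes out-of-range row/col, on which A raises IndexError, and NEGATIVE
-- col, which is outside the natural grid-position domain: there A's Python wraps
-- around and its first loop rescans from the row's start (e.g. it returns
-- ('212', 2) on ([["1","2"]], 0, -1)), while B wraps only its direct index.
-- Negative in-range row (plain wraparound, identical in A and B) stays inside.
def Pre_get_full_number (arr : List (List String)) (row : Int) (col : Int) : Prop :=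
  PySem.Raise.InRange arr.length row ∧ 0 ≤ col ∧
    col < (((PySem.List.pyGet? arr row).getD []).length : Int)
instance (arr : List (List String)) (row : Int) (col : Int) : Decidable (Pre_get_full_number arr row col) := by unfold Pre_get_full_number; infer_instance

def pvWitness_get_full_number : List (List String) × Int × Int := ([["1", "2"]], 0, 0)

def Spec_get_full_number (arr : List (List String)) (row : Int) (col : Int) (out : String × Int) : Prop := out = get_full_number_alt arr row col
instance (arr : List (List String)) (row : Int) (col : Int) (out : String × Int) : Decidable (Spec_get_full_number arr row col out) := by unfold Spec_get_full_number; infer_instance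

-- ===== CLAIM (what is proved, stated in full; the proofs are below) =====
def Claim_equal_get_full_number : Prop := ∀ (arr : List (List String)) (row : Int) (col : Int), Dom_get_full_number arr row col → Pre_get_full_number arr row col → Spec_get_full_number arr row col (get_full_number arr row col)

-- ===== LEMMAS AND PROOFS =====

lemma scanR_ge (line : List String) (r : Int) : r ≤ scanR line r := by
  fun_induction scanR line r with
  | case1 r h ih => omega
  | case2 r h => omega

lemma scanR_lt (line : List String) (r : Int) (h : r < (line.length : Int)) :
    scanR line r < (line.length : Int) := by
  fun_induction scanR line r with
  | case1 r h' ih => exact ih (by omega)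
  | case2 r h' => exact h

lemma scanL_le (line : List String) (l : Int) : scanL line l ≤ l := by
  fun_induction scanL line l with
  | case1 l h ih => omega
  | case2 l h => omega

lemma scanL_nonneg (line : List String) (l : Int) (h : 0 ≤ l) : 0 ≤ scanL line l := by
  fun_induction scanL line l with
  | case1 l h' ih => exact ih (by omega)
  | case2 l h' => exact h

lemma pyRange_desc_nil (a : Int) (h : a ≤ -1) : PySem.List.pyRange a (-1) (-1) = [] := by
  simp only [PySem.List.pyRange]
  norm_num
  omega

lemma pyRange_desc_cons (a : Int) (h : 0 ≤ a) :
    PySem.List.pyRange a (-1) (-1) = a :: PySem.List.pyRange (a - 1) (-1) (-1) := by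
  simp only [PySem.List.pyRange]
  norm_num
  rw [if_pos (by omega : (-1:Int) < a)]
  by_cases h2 : (0:Int) < a
  · rw [if_pos h2]
    have h4 : (a + 1).toNat = a.toNat + 1 := by omega
    rw [h4, List.range_succ_eq_map]
    simp only [List.map_cons, List.map_map]
    congr 1
    · push_cast; ring
    · apply List.map_congr_left
      intro x hx
      simp only [Function.comp_apply]
      push_cast
      ring
  · rw [if_neg h2]
    have ha : a = 0 := by omega
    subst ha
    simp [List.range_succ]

lemma slice_self {α : Type} (xs : List α) (a : Int) (h : 0 ≤ a) :
    PySem.List.slice xs (some a) (some a) = [] := by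
  rw [show a = ((a.toNat : Nat) : Int) by omega, PySem.List.slice_natCast]
  simp

lemma slice_cons {α : Type} (xs : List α) (a b : Int) (h0 : 0 ≤ a) (hab : a < b)
    (hb : b ≤ (xs.length : Int)) :
    PySem.List.slice xs (some a) (some b)
      = (xs[a.toNat]?).toList ++ PySem.List.slice xs (some (a + 1)) (some b) := by
  obtain ⟨n, rfl⟩ : ∃ n : Nat, a = (n : Int) := ⟨a.toNat, by omega⟩
  obtain ⟨m, rfl⟩ : ∃ m : Nat, b = (m : Int) := ⟨b.toNat, by omega⟩
  rw [show ((n : Nat) : Int) + 1 = ((n + 1 : Nat) : Int) by omega,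
    PySem.List.slice_natCast, PySem.List.slice_natCast]
  rw [show m - n = (m - (n + 1)) + 1 by omega]
  rw [List.drop_eq_getElem_cons (by omega : n < xs.length), List.take_succ_cons]
  rw [show ((n : Nat) : Int).toNat = n by omega]
  rw [List.getElem?_eq_getElem (by omega : n < xs.length)]
  simp

lemma slice_snoc {α : Type} (xs : List α) (a b : Int) (h0 : 0 ≤ a) (hab : a < b)
    (hb : b ≤ (xs.length : Int)) :
    PySem.List.slice xs (some a) (some b)
      = PySem.List.slice xs (some a) (some (b - 1)) ++ (xs[(b - 1).toNat]?).toList := by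
  obtain ⟨n, rfl⟩ : ∃ n : Nat, a = (n : Int) := ⟨a.toNat, by omega⟩
  obtain ⟨m, rfl⟩ : ∃ m : Nat, b = (m : Int) := ⟨b.toNat, by omega⟩
  rw [show ((m : Nat) : Int) - 1 = ((m - 1 : Nat) : Int) by omega,
    PySem.List.slice_natCast, PySem.List.slice_natCast]
  rw [show m - n = (m - 1 - n) + 1 by omega, List.take_add_one]
  congr 1
  rw [List.getElem?_drop]
  congr 2
  omega

lemma slice_split {α : Type} (xs : List α) (a b c : Int) (h0 : 0 ≤ a) (hab : a ≤ b)
    (hbc : b ≤ c) :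
    PySem.List.slice xs (some a) (some c)
      = PySem.List.slice xs (some a) (some b) ++ PySem.List.slice xs (some b) (some c) := by
  obtain ⟨n, rfl⟩ : ∃ n : Nat, a = (n : Int) := ⟨a.toNat, by omega⟩
  obtain ⟨p, rfl⟩ : ∃ p : Nat, b = (p : Int) := ⟨b.toNat, by omega⟩
  obtain ⟨q, rfl⟩ : ∃ q : Nat, c = (q : Int) := ⟨c.toNat, by omega⟩
  rw [PySem.List.slice_natCast, PySem.List.slice_natCast, PySem.List.slice_natCast]
  rw [show q - n = (p - n) + (q - p) by omega, List.take_add]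
  congr 1
  rw [List.drop_drop]
  congr 2
  omega

lemma pyRange_asc_nil (a b : Int) (h : b ≤ a) : PySem.List.pyRange a b = [] := by
  simp only [PySem.List.pyRange]
  norm_num
  omega

lemma loopR_eq (line : List String) (j : Int) (hj : 0 ≤ j) : ∀ (s : List Char) (k : Int),
    loopA_R line (PySem.List.pyRange (j + 1) (line.length : Int)) s k
      = (s ++ (PySem.List.slice line (some (j + 1)) (some (scanR line j + 1))).flatMap String.toList,
         k + (scanR line j - j)) := by
  fun_induction scanR line j with
  | case1 j h ih =>
    intro s k
    rw [PySem.List.pyRange_one_cons (by omega : j + 1 < (line.length : Int))]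
    simp only [loopA_R]
    rw [if_pos h.2]
    rw [ih (by omega)]
    have hge : j + 1 ≤ scanR line (j + 1) := scanR_ge line (j + 1)
    have hlt : scanR line (j + 1) < (line.length : Int) := scanR_lt line (j + 1) h.1
    rw [slice_cons line (j + 1) (scanR line (j + 1) + 1) (by omega) (by omega) (by omega)]
    have hc : PySem.List.pyGet? line (j + 1) = getElem? line ((j + 1).toNat) := by
      rw [show (j + 1 : Int) = (((j + 1).toNat : Nat) : Int) by omega, PySem.List.pyGet?_natCast]
      congr 1
    rw [List.getElem?_eq_getElem (by omega : (j + 1).toNat < line.length)] at hc ⊢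
    simp only [hc, Option.getD_some, Option.toList_some, List.flatMap_cons, List.flatMap_append,
      List.append_assoc, List.flatMap_cons, List.flatMap_nil, List.append_nil]
    refine Prod.ext rfl ?_
    simp only
    omega
  | case2 j h =>
    intro s k
    rw [slice_self line (j + 1) (by omega)]
    simp only [List.flatMap_nil, List.append_nil]
    by_cases hlen : (line.length : Int) ≤ j + 1
    · rw [pyRange_asc_nil _ _ hlen]
      simp only [loopA_R]
      refine Prod.ext rfl ?_
      simp only
      omega
    · rw [PySem.List.pyRange_one_cons (by omega : j + 1 < (line.length : Int))]
      simp only [loopA_R]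
      rw [if_neg (fun hd => h ⟨by omega, hd⟩)]
      refine Prod.ext rfl ?_
      simp only
      omega

lemma loopL_eq (line : List String) (j : Int) (hj : 0 ≤ j) (hj2 : j ≤ (line.length : Int)) : ∀ (s : List Char),
    loopA_L line (PySem.List.pyRange (j - 1) (-1) (-1)) s
      = (PySem.List.slice line (some (scanL line j)) (some j)).flatMap String.toList ++ s := by
  fun_induction scanL line j with
  | case1 j h ih =>
    intro s
    rw [pyRange_desc_cons (j - 1) (by omega)]
    simp only [loopA_L]
    rw [if_pos h.2]
    rw [show j - 1 - 1 = (j - 1) - 1 by ring]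
    rw [ih (by omega) (by omega)]
    have hle : scanL line (j - 1) ≤ j - 1 := scanL_le line (j - 1)
    have hnn : 0 ≤ scanL line (j - 1) := scanL_nonneg line (j - 1) (by omega)
    rw [slice_snoc line (scanL line (j - 1)) j (by omega) (by omega) (by omega)]
    have hc : PySem.List.pyGet? line (j - 1) = getElem? line ((j - 1).toNat) := by
      rw [show (j - 1 : Int) = (((j - 1).toNat : Nat) : Int) by omega, PySem.List.pyGet?_natCast]
      congr 1
    rw [List.getElem?_eq_getElem (by omega : (j - 1).toNat < line.length)] at hc ⊢
    simp only [hc, Option.getD_some, Option.toList_some, List.flatMap_append, List.flatMap_cons,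
      List.flatMap_nil, List.append_nil, List.append_assoc]
  | case2 j h =>
    intro s
    rw [slice_self line j (by omega)]
    simp only [List.flatMap_nil, List.nil_append]
    by_cases hz : j = 0
    · subst hz
      rw [pyRange_desc_nil (0 - 1) (by omega)]
      simp only [loopA_L]
    · rw [pyRange_desc_cons (j - 1) (by omega)]
      simp only [loopA_L]
      rw [if_neg (fun hd => h ⟨by omega, hd⟩)]

lemma join_empty_toList (parts : List String) :
    (PySem.Str.join "" parts).toList = parts.flatMap String.toList := by
  rw [PySem.Str.toList_join]
  have : ∀ xs : List (List Char), PySem.Chars.join [] xs = xs.flatten := by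
    intro xs
    induction xs with
    | nil => rfl
    | cons h t ih => cases t <;> simp_all [PySem.Chars.join, List.intercalate, List.intersperse]
  simpa [List.flatMap_def] using this (parts.map String.toList)

-- ===== VERDICT (by name: the statement is the Claim_ definition above) =====
theorem get_full_number_spec : Claim_equal_get_full_number := by
  intro arr row col _ hpre
  obtain ⟨hrow, hc0, hclt⟩ := hpre
  unfold Spec_get_full_number
  simp only [get_full_number, get_full_number_alt]
  set line := (PySem.List.pyGet? arr row).getD [] with hline
  have hR := scanR_ge line col
  have hRlt := scanR_lt line col hclt
  have hL := scanL_le line col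
  have hL0 := scanL_nonneg line col hc0
  rw [loopR_eq line col hc0 (((PySem.List.pyGet? line col).getD "").toList) 0]
  rw [loopL_eq line col hc0 (by omega)]
  refine Prod.ext ?_ (by simp only; omega)
  simp only
  rw [← String.toList_inj]
  rw [join_empty_toList, String.toList_ofList]
  rw [slice_split line (scanL line col) col (scanR line col + 1) hL0 hL (by omega)]
  rw [slice_cons line col (scanR line col + 1) hc0 (by omega) (by omega)]
  have hc : PySem.List.pyGet? line col = getElem? line (col.toNat) := by
    rw [show (col : Int) = ((col.toNat : Nat) : Int) by omega, PySem.List.pyGet?_natCast]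
    congr 1
  rw [List.getElem?_eq_getElem (by omega : col.toNat < line.length)] at hc ⊢
  simp only [hc, Option.getD_some, Option.toList_some, List.flatMap_append, List.flatMap_cons,
    List.flatMap_nil, List.append_nil]
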